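-- pv_equiv track=rewrite | github.com/TylerFlar/tasque | src/tasque/discord/chain_status_panel.py | _truncate_lines
-- ===== SOURCE A (Python) =====
-- def _truncate_lines(lines: list[str], limit: int) -> str:
--     """Join ``lines`` with newlines, dropping the tail when the joined
--     text would exceed ``limit``. Always leaves a clear truncation marker
--     so the user knows there's more they aren't seeing."""
--     out: list[str] = []
--     used = 0
--     for line in lines:
--         # +1 for the newline.
--         added = len(line) + 1
--         if used + added > limit - 32:  # leave room for the marker
--             remaining = len(lines) - len(out)
--             out.append(f"… +{remaining} more steps")
--             break
--         out.append(line)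
--         used += added
--     return "\n".join(out)
-- ===== SOURCE B (Python) =====
-- from itertools import accumulate
-- from bisect import bisect_right
--
-- def _truncate_lines(lines: list[str], limit: int) -> str:
--     """Prefix-sum table of per-line costs, then bisect for the cutoff."""
--     prefix = list(accumulate(len(line) + 1 for line in lines))
--     k = bisect_right(prefix, limit - 32)
--     if k == len(lines):
--         return "\n".join(lines)
--     return "\n".join(lines[:k] + [f"… +{len(lines) - k} more steps"])
-- ===== Notes on version B (the rewrite author's own statement) =====
-- stated objective: alternative
-- what changed: Replaces A's single early-break scan that accumulates output lines and a running total with a prefix-sum table of per-line costs, a bisect_right cutoff k on that table, and a separate assembly pass joining lines[:k] (plus the marker when k < len(lines)).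
import Mathlib
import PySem

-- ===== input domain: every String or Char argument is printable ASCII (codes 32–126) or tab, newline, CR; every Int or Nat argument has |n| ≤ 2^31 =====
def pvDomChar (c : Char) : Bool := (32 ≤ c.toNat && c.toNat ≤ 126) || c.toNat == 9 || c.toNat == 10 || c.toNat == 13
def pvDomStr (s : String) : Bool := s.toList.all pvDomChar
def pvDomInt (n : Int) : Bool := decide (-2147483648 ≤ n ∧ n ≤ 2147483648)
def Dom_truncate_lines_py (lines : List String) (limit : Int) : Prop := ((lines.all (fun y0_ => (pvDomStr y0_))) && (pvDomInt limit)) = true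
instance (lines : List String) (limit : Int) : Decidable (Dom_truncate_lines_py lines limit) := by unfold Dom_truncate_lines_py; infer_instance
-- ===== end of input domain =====

-- B replaces A's early-break accumulating scan with a prefix-sum table plus a bisect cutoff and a
-- separate assembly pass (objective: alternative decomposition, same O(total length) cost).

-- ===== PORT A =====
-- A's for-loop with break: structural recursion over the remaining lines,
-- carrying `out` and `used` exactly as the Python does (total = len(lines)).
def pvALoop (total limit : Int) : List String → List String → Int → List String
  | [], out, _ => out
  | line :: rest, out, used =>
    let added := PySem.Str.len line + 1
    if used + added > limit - 32 then
      out ++ ["… +" ++ PySem.Int.toStr (total - (out.length : Int)) ++ " more steps"]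
    else
      pvALoop total limit rest (out ++ [line]) (used + added)

def truncate_lines_py (lines : List String) (limit : Int) : String :=
  PySem.Str.join "\n" (pvALoop (lines.length : Int) limit lines [] 0)

-- ===== PORT B =====
-- itertools.accumulate of (len(line)+1): the running prefix sums.
def pvPrefix : List String → Int → List Int
  | [], _ => []
  | line :: rest, acc =>
    let s := acc + (PySem.Str.len line + 1)
    s :: pvPrefix rest s

def truncate_lines_py_alt (lines : List String) (limit : Int) : String :=
  let pfx := pvPrefix lines 0
  -- bisect_right on the (strictly increasing) prefix table = number of leading entries ≤ cap
  let k := (pfx.takeWhile (fun c => c ≤ limit - 32)).length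
  if k = lines.length then PySem.Str.join "\n" lines
  else PySem.Str.join "\n"
    (lines.take k ++ ["… +" ++ PySem.Int.toStr ((lines.length : Int) - (k : Int)) ++ " more steps"])

-- ===== PRECONDITION & SPEC =====
def Spec_truncate_lines_py (lines : List String) (limit : Int) (out : String) : Prop := out = truncate_lines_py_alt lines limit
instance (lines : List String) (limit : Int) (out : String) : Decidable (Spec_truncate_lines_py lines limit out) := by unfold Spec_truncate_lines_py; infer_instance

-- ===== CLAIM (what is proved, stated in full; the proofs are below) =====
def Claim_equal_truncate_lines_py : Prop := ∀ (lines : List String) (limit : Int), Dom_truncate_lines_py lines limit → Spec_truncate_lines_py lines limit (truncate_lines_py lines limit)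

-- ===== LEMMAS AND PROOFS =====

-- Characterisation of A's loop in terms of B's prefix table.
lemma pvALoop_eq (total limit : Int) (rest : List String) :
    ∀ (out : List String) (used : Int),
    pvALoop total limit rest out used =
      (let k := ((pvPrefix rest used).takeWhile (fun c => c ≤ limit - 32)).length
       if k = rest.length then out ++ rest
       else out ++ rest.take k ++
         ["… +" ++ PySem.Int.toStr (total - (out.length : Int) - (k : Int)) ++ " more steps"]) := by
  induction rest with
  | nil => intro out used; simp [pvALoop, pvPrefix]
  | cons line rest ih =>
    intro out used
    simp only [pvALoop, pvPrefix, List.takeWhile]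
    by_cases h : used + (PySem.Str.len line + 1) > limit - 32
    · rw [if_pos h]
      have hc : decide (used + (PySem.Str.len line + 1) ≤ limit - 32) = false :=
        decide_eq_false (by omega)
      simp only [hc]
      simp
    · rw [if_neg h]
      have hc : decide (used + (PySem.Str.len line + 1) ≤ limit - 32) = true :=
        decide_eq_true (by omega)
      rw [ih]
      simp only [hc, List.length_cons, List.length_append,
        List.length_nil, Nat.zero_add, List.take_succ_cons]
      split_ifs with h1 h2 h3 <;> try omega
      · simp
      · have : total - ((out.length + 1 : Nat) : Int) -
            (((pvPrefix rest (used + (PySem.Str.len line + 1))).takeWhile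
              (fun c => c ≤ limit - 32)).length : Int)
            = total - (out.length : Int) -
              ((((pvPrefix rest (used + (PySem.Str.len line + 1))).takeWhile
                (fun c => c ≤ limit - 32)).length + 1 : Nat) : Int) := by
          push_cast; ring
        rw [this]
        simp

lemma truncate_agree (lines : List String) (limit : Int) :
    truncate_lines_py lines limit = truncate_lines_py_alt lines limit := by
  unfold truncate_lines_py truncate_lines_py_alt
  rw [pvALoop_eq]
  simp only []
  by_cases hk : ((pvPrefix lines 0).takeWhile (fun c => c ≤ limit - 32)).length = lines.length
  · simp [hk]
  · simp [hk]

-- ===== VERDICT (by name: the statement is the Claim_ definition above) =====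
theorem truncate_lines_py_spec : Claim_equal_truncate_lines_py := by
  intro lines limit _
  exact truncate_agree lines limit
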